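-- pv_equiv track=rewrite | github.com/frosty865/PSA_Tool | services/postprocess.py | _generate_keyword_implied_vulnerability
-- ===== SOURCE A (Python) =====
-- def _generate_keyword_implied_vulnerability(ofcs, heuristics):
--     """Helper function for keyword-based implied vulnerability generation (fallback)."""
--     ofc_keywords = []
--     for ofc in ofcs[:2]:  # Use first 2 OFCs for context
--         ofc_lower = str(ofc).lower()
--         # Extract key security/design terms
--         if any(term in ofc_lower for term in ["visitor", "access", "entry"]):
--             ofc_keywords.append("access control")
--         elif any(term in ofc_lower for term in ["perimeter", "fence", "barrier", "bollard"]):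
--             ofc_keywords.append("perimeter security")
--         elif any(term in ofc_lower for term in ["camera", "surveillance", "monitoring"]):
--             ofc_keywords.append("surveillance")
--         elif any(term in ofc_lower for term in ["policy", "procedure", "plan"]):
--             ofc_keywords.append("governance")
--         elif any(term in ofc_lower for term in ["lighting", "visibility"]):
--             ofc_keywords.append("lighting")
--
--     # Create context-specific implied vulnerability
--     if ofc_keywords:
--         primary_domain = ofc_keywords[0] if ofc_keywords else "design element"
--         return f"(Implied: Missing or inadequate {primary_domain})"
--     else:
--         # Fallback to generic text
--         if heuristics.get("postprocess", {}).get("promote_ofc_only", False):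
--             return heuristics["postprocess"].get(
--                 "generate_implied_vulnerability",
--                 "(Implied design weakness or gap in planning guidance)"
--             )
--         else:
--             return "(Implied design weakness or missing standard)"
-- ===== SOURCE B (Python) =====
-- _TERMS = {
--     "visitor": 0, "access": 0, "entry": 0,
--     "perimeter": 1, "fence": 1, "barrier": 1, "bollard": 1,
--     "camera": 2, "surveillance": 2, "monitoring": 2,
--     "policy": 3, "procedure": 3, "plan": 3,
--     "lighting": 4, "visibility": 4,
-- }
-- _LABELS = ["access control", "perimeter security", "surveillance",
--            "governance", "lighting"]
--
--
-- def _generate_keyword_implied_vulnerability(ofcs, heuristics):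
--     """Exhaustive hit collection + lexicographic min instead of per-OFC if/elif chains."""
--     lows = [str(o).lower() for o in ofcs[:2]]
--     hits = [(i, g) for i, low in enumerate(lows)
--             for t, g in _TERMS.items() if t in low]
--     if hits:
--         return "(Implied: Missing or inadequate %s)" % _LABELS[min(hits)[1]]
--     pp = heuristics.get("postprocess", {})
--     if pp.get("promote_ofc_only", False):
--         return pp.get("generate_implied_vulnerability",
--                       "(Implied design weakness or gap in planning guidance)")
--     return "(Implied design weakness or missing standard)"
-- ===== Notes on version B (the rewrite author's own statement) =====
-- stated objective: alternative
-- what changed: B replaces A's per-OFC if/elif classification chain that accumulates labels and takes [0] by an exhaustive comprehension collecting every (ofc_index, group_index) keyword hit over a flat term->group map, then selecting the lexicographic minimum hit; the fallback strings and heuristics.get chain are kept verbatim.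
import Mathlib
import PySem

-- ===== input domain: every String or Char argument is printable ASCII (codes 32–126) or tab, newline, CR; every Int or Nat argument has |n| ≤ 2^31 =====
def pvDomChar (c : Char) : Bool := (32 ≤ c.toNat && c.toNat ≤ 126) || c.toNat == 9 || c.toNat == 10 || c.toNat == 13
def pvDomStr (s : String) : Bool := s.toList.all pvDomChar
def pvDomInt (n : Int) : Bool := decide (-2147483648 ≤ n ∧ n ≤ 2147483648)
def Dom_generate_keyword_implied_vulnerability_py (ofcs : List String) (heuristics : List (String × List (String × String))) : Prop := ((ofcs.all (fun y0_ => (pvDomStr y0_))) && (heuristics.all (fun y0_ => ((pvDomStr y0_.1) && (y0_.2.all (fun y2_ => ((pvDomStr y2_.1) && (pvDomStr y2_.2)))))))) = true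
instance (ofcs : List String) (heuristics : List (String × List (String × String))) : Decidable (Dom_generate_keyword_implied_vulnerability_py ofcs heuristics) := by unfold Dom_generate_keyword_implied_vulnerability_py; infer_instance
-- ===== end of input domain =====

-- B replaces A's per-OFC if/elif chain (accumulate labels, take [0]) by an exhaustive collection of
-- (ofc_index, group_index) keyword hits over a flat term->group map followed by a lexicographic min
-- (objective: alternative); the two fallback strings and the heuristics.get chain are kept verbatim.

-- ===== PORT A =====
-- step of A's accumulation loop: the if/elif keyword chain appending to ofc_keywords
def pvClassStep (acc : List String) (ofc : String) : List String :=
  let l := PySem.Str.lower ofc   -- str(ofc).lower(); ofc is already a str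
  if PySem.Str.isIn "visitor" l || PySem.Str.isIn "access" l || PySem.Str.isIn "entry" l then
    acc ++ ["access control"]
  else if PySem.Str.isIn "perimeter" l || PySem.Str.isIn "fence" l || PySem.Str.isIn "barrier" l || PySem.Str.isIn "bollard" l then
    acc ++ ["perimeter security"]
  else if PySem.Str.isIn "camera" l || PySem.Str.isIn "surveillance" l || PySem.Str.isIn "monitoring" l then
    acc ++ ["surveillance"]
  else if PySem.Str.isIn "policy" l || PySem.Str.isIn "procedure" l || PySem.Str.isIn "plan" l then
    acc ++ ["governance"]
  else if PySem.Str.isIn "lighting" l || PySem.Str.isIn "visibility" l then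
    acc ++ ["lighting"]
  else acc

def generate_keyword_implied_vulnerability_py (ofcs : List String) (heuristics : List (String × List (String × String))) : String :=
  let ofc_keywords := (PySem.List.slice ofcs none (some 2)).foldl pvClassStep []
  if !ofc_keywords.isEmpty then
    let primary := if !ofc_keywords.isEmpty then ofc_keywords.headD "design element" else "design element"
    "(Implied: Missing or inadequate " ++ primary ++ ")"
  else
    -- heuristics.get("postprocess", {}).get("promote_ofc_only", False): a present value is
    -- a str, tested for Python truthiness (nonempty); in the true branch heuristics["postprocess"] = pp
    let pp := PySem.Dict.getD (PySem.Dict.mk heuristics) "postprocess" []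
    let promote : Bool := match PySem.Dict.get? (PySem.Dict.mk pp) "promote_ofc_only" with
      | some v => v != ""
      | none => false
    if promote then
      PySem.Dict.getD (PySem.Dict.mk pp) "generate_implied_vulnerability" "(Implied design weakness or gap in planning guidance)"
    else
      "(Implied design weakness or missing standard)"

-- ===== PORT B =====
-- the flat _TERMS dict as an association list in insertion order (term -> group index)
def pvTermGroups : List (String × Nat) :=
  [("visitor", 0), ("access", 0), ("entry", 0),
   ("perimeter", 1), ("fence", 1), ("barrier", 1), ("bollard", 1),
   ("camera", 2), ("surveillance", 2), ("monitoring", 2),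
   ("policy", 3), ("procedure", 3), ("plan", 3),
   ("lighting", 4), ("visibility", 4)]

def pvLabels : List String :=
  ["access control", "perimeter security", "surveillance", "governance", "lighting"]

-- Python '<' on the (i, g) hit tuples: lexicographic
def pvPairLt (a b : Int × Nat) : Bool := a.1 < b.1 || (a.1 == b.1 && a.2 < b.2)

-- min(hits): running minimum keeping the first minimal tuple
def pvMin? (l : List (Int × Nat)) : Option (Int × Nat) :=
  l.foldl (fun acc x => match acc with
    | none => some x
    | some m => some (if pvPairLt x m then x else m)) none

-- the inner clause of the hits comprehension: all (i, g) hits of one lowered string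
def pvHitsFor (i : Int) (low : String) : List (Int × Nat) :=
  pvTermGroups.filterMap (fun tg => if PySem.Str.isIn tg.1 low then some (i, tg.2) else none)

-- the generic-text fallback when there is no hit (pp.get("promote_ofc_only", False) tested for truthiness)
def pvFallback (heuristics : List (String × List (String × String))) : String :=
  let pp := PySem.Dict.getD (PySem.Dict.mk heuristics) "postprocess" []
  if PySem.Dict.getD (PySem.Dict.mk pp) "promote_ofc_only" "" != "" then
    PySem.Dict.getD (PySem.Dict.mk pp) "generate_implied_vulnerability" "(Implied design weakness or gap in planning guidance)"
  else
    "(Implied design weakness or missing standard)"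

def generate_keyword_implied_vulnerability_py_alt (ofcs : List String) (heuristics : List (String × List (String × String))) : String :=
  let lows := (PySem.List.slice ofcs none (some 2)).map PySem.Str.lower
  let hits := (PySem.List.enumerate lows).flatMap (fun p => pvHitsFor p.1 p.2)
  match pvMin? hits with
  | some m => "(Implied: Missing or inadequate " ++ pvLabels.getD m.2 "" ++ ")"  -- _LABELS[g]: g is always 0..4, in range
  | none => pvFallback heuristics

-- ===== PRECONDITION & SPEC =====
def Spec_generate_keyword_implied_vulnerability_py (ofcs : List String) (heuristics : List (String × List (String × String))) (out : String) : Prop := out = generate_keyword_implied_vulnerability_py_alt ofcs heuristics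
instance (ofcs : List String) (heuristics : List (String × List (String × String))) (out : String) : Decidable (Spec_generate_keyword_implied_vulnerability_py ofcs heuristics out) := by unfold Spec_generate_keyword_implied_vulnerability_py; infer_instance

-- ===== CLAIM (what is proved, stated in full; the proofs are below) =====
def Claim_equal_generate_keyword_implied_vulnerability_py : Prop := ∀ (ofcs : List String) (heuristics : List (String × List (String × String))), Dom_generate_keyword_implied_vulnerability_py ofcs heuristics → Spec_generate_keyword_implied_vulnerability_py ofcs heuristics (generate_keyword_implied_vulnerability_py ofcs heuristics)

-- ===== LEMMAS AND PROOFS =====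

-- proof-only helper: the minimal matching group index of a single lowered string
def pvMinGroup? (low : String) : Option Nat :=
  if PySem.Str.isIn "visitor" low || PySem.Str.isIn "access" low || PySem.Str.isIn "entry" low then some 0
  else if PySem.Str.isIn "perimeter" low || PySem.Str.isIn "fence" low || PySem.Str.isIn "barrier" low || PySem.Str.isIn "bollard" low then some 1
  else if PySem.Str.isIn "camera" low || PySem.Str.isIn "surveillance" low || PySem.Str.isIn "monitoring" low then some 2
  else if PySem.Str.isIn "policy" low || PySem.Str.isIn "procedure" low || PySem.Str.isIn "plan" low then some 3
  else if PySem.Str.isIn "lighting" low || PySem.Str.isIn "visibility" low then some 4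
  else none

def pvLabelOf (g : Nat) : String := pvLabels.getD g ""

theorem pvClassStep_eq (acc : List String) (ofc : String) :
    pvClassStep acc ofc = acc ++ ((pvMinGroup? (PySem.Str.lower ofc)).map pvLabelOf).toList := by
  simp only [pvClassStep, pvMinGroup?]
  split_ifs <;> simp [pvLabelOf, pvLabels]

theorem pvFoldl_eq (acc : List String) (l : List String) :
    l.foldl pvClassStep acc
      = acc ++ (l.flatMap (fun s => (pvMinGroup? (PySem.Str.lower s)).toList)).map pvLabelOf := by
  induction l generalizing acc with
  | nil => simp
  | cons a t ih => simp [List.foldl_cons, pvClassStep_eq, ih, Option.toList_map]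

theorem pvMerge_assoc (u a m : Int × Nat) :
    (if pvPairLt u (if pvPairLt a m then a else m) then u else (if pvPairLt a m then a else m))
    = (if pvPairLt (if pvPairLt u a then u else a) m then (if pvPairLt u a then u else a) else m) := by
  obtain ⟨u1, u2⟩ := u; obtain ⟨a1, a2⟩ := a; obtain ⟨m1, m2⟩ := m
  simp only [pvPairLt] at *
  split_ifs <;> simp_all [Prod.ext_iff] <;> omega

theorem pvMinFold_some (l : List (Int × Nat)) (m : Int × Nat) :
    l.foldl (fun acc x => match acc with
      | none => some x
      | some m => some (if pvPairLt x m then x else m)) (some m)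
    = some ((pvMin? l).elim m (fun m' => if pvPairLt m' m then m' else m)) := by
  induction l generalizing m with
  | nil => simp [pvMin?]
  | cons a t ih =>
    have hR : pvMin? (a :: t)
        = some ((pvMin? t).elim a (fun u => if pvPairLt u a then u else a)) := by
      rw [pvMin?, List.foldl_cons]
      exact ih a
    rw [List.foldl_cons, ih, hR]
    cases h : pvMin? t with
    | none => simp
    | some u => simp only [Option.elim_some, Option.some.injEq]; exact pvMerge_assoc u a m

theorem pvMin?_cons (a : Int × Nat) (t : List (Int × Nat)) :
    pvMin? (a :: t) = some ((pvMin? t).elim a (fun u => if pvPairLt u a then u else a)) := by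
  rw [pvMin?, List.foldl_cons]
  exact pvMinFold_some t a

theorem pvMin?_mem (l : List (Int × Nat)) (m : Int × Nat) (h : pvMin? l = some m) : m ∈ l := by
  induction l with
  | nil => simp [pvMin?] at h
  | cons a t ih =>
    rw [pvMin?_cons] at h
    cases h2 : pvMin? t with
    | none => simp [h2] at h; simp [h]
    | some u =>
      simp only [h2, Option.elim_some, Option.some.injEq] at h
      by_cases hlt : pvPairLt u a
      · simp [hlt] at h; subst h; exact List.mem_cons_of_mem _ (ih h2)
      · simp [hlt] at h; simp [h]

theorem pvMin?_append (l1 l2 : List (Int × Nat)) :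
    pvMin? (l1 ++ l2)
      = (pvMin? l1).elim (pvMin? l2)
          (fun m1 => some ((pvMin? l2).elim m1 (fun m2 => if pvPairLt m2 m1 then m2 else m1))) := by
  induction l1 with
  | nil => simp [pvMin?]
  | cons a t ih =>
    rw [List.cons_append, pvMin?_cons, pvMin?_cons, ih]
    cases h1 : pvMin? t with
    | none =>
      cases h2 : pvMin? l2 <;> simp
    | some u =>
      cases h2 : pvMin? l2 with
      | none => simp
      | some v =>
        simp only [Option.elim_some, Option.elim_some, Option.some.injEq]
        exact (pvMerge_assoc v u a).symm

theorem pvMin?_filter_const (i : Int) (g : Nat) (low : String) (ts : List (String × Nat))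
    (hg : ∀ p ∈ ts, p.2 = g) :
    pvMin? (ts.filterMap (fun tg => if PySem.Str.isIn tg.1 low then some (i, tg.2) else none))
      = if ts.any (fun tg => PySem.Str.isIn tg.1 low) then some (i, g) else none := by
  induction ts with
  | nil => simp [pvMin?]
  | cons p t ih =>
    have hp : p.2 = g := hg p (by simp)
    have ht : ∀ q ∈ t, q.2 = g := fun q hq => hg q (by simp [hq])
    by_cases hin : PySem.Str.isIn p.1 low
    · simp only [List.filterMap_cons, hin, if_true, pvMin?_cons, ih ht, hp, List.any_cons,
        Bool.true_or]
      by_cases h : t.any (fun tg => PySem.Str.isIn tg.1 low)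
      · rw [if_pos h]
        simp [pvPairLt]
      · rw [if_neg h]
        simp
    · simp only [List.filterMap_cons, hin, Bool.false_eq_true, if_false, List.any_cons,
        Bool.false_or]
      exact ih ht

set_option maxHeartbeats 1000000 in
theorem pvMin?_hitsFor (i : Int) (low : String) :
    pvMin? (pvHitsFor i low) = (pvMinGroup? low).map (fun g => (i, g)) := by
  have hsplit : pvTermGroups =
      [("visitor", 0), ("access", 0), ("entry", 0)] ++
      ([("perimeter", 1), ("fence", 1), ("barrier", 1), ("bollard", 1)] ++
       ([("camera", 2), ("surveillance", 2), ("monitoring", 2)] ++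
        ([("policy", 3), ("procedure", 3), ("plan", 3)] ++
         [("lighting", 4), ("visibility", 4)]))) := rfl
  unfold pvHitsFor
  rw [hsplit]
  rw [List.filterMap_append, List.filterMap_append, List.filterMap_append, List.filterMap_append]
  rw [pvMin?_append, pvMin?_append, pvMin?_append, pvMin?_append]
  rw [pvMin?_filter_const i 0 low _ (by intro p hp; fin_cases hp <;> rfl),
      pvMin?_filter_const i 1 low _ (by intro p hp; fin_cases hp <;> rfl),
      pvMin?_filter_const i 2 low _ (by intro p hp; fin_cases hp <;> rfl),
      pvMin?_filter_const i 3 low _ (by intro p hp; fin_cases hp <;> rfl),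
      pvMin?_filter_const i 4 low _ (by intro p hp; fin_cases hp <;> rfl)]
  unfold pvMinGroup?
  simp only [List.any_cons, List.any_nil, Bool.or_false, Bool.or_assoc]
  split_ifs <;> simp [pvPairLt]

theorem pvHitsFor_fst (i : Int) (low : String) (q : Int × Nat) (hq : q ∈ pvHitsFor i low) :
    q.1 = i := by
  unfold pvHitsFor at hq
  rw [List.mem_filterMap] at hq
  obtain ⟨tg, _, htg⟩ := hq
  by_cases h : PySem.Str.isIn tg.1 low
  · rw [if_pos h] at htg
    cases htg
    rfl
  · rw [if_neg h] at htg
    cases htg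

-- the core correspondence: the second component of the minimal hit over enumerate-with-start-s
-- is the first string's minimal matching group, first string with a hit winning
theorem pvMin?_enum (s : Int) (l : List String) :
    (pvMin? ((PySem.List.enumerate l s).flatMap (fun p => pvHitsFor p.1 p.2))).map (fun m => m.2)
      = (l.flatMap (fun x => (pvMinGroup? x).toList)).head? := by
  induction l generalizing s with
  | nil => simp [PySem.List.enumerate, pvMin?]
  | cons a t ih =>
    rw [PySem.List.enumerate_cons, List.flatMap_cons, pvMin?_append, pvMin?_hitsFor]
    cases h : pvMinGroup? a with
    | none => simpa [h] using ih (s + 1)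
    | some g =>
      have hrest : ∀ m2, pvMin? ((PySem.List.enumerate t (s + 1)).flatMap (fun p => pvHitsFor p.1 p.2)) = some m2 →
          pvPairLt m2 (s, g) = false := by
        intro m2 hm2
        have hmem := pvMin?_mem _ _ hm2
        rw [List.mem_flatMap] at hmem
        obtain ⟨p, hp, hq⟩ := hmem
        have h1 : m2.1 = p.1 := pvHitsFor_fst p.1 p.2 m2 hq
        rw [PySem.List.mem_enumerate_iff] at hp
        obtain ⟨k, hk, hpk⟩ := hp
        have : m2.1 = s + 1 + k := by rw [h1, hpk]
        simp only [pvPairLt, Bool.or_eq_false_iff]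
        constructor <;> [skip; simp only [Bool.and_eq_false_iff]] <;> first
          | (simp only [decide_eq_false_iff_not]; omega)
          | (left; simp only [beq_eq_false_iff_ne]; omega)
      cases h2 : pvMin? ((PySem.List.enumerate t (s + 1)).flatMap (fun p => pvHitsFor p.1 p.2)) with
      | none => simp [h]
      | some m2 => simp [h, hrest m2 h2]

-- Python truthiness of pp.get("promote_ofc_only", False): A's match on get? equals B's getD-"" test
theorem pvPromote_eq (d : PySem.Dict String String) :
    (match d.get? "promote_ofc_only" with
     | some v => v != ""
     | none => false)
    = (d.getD "promote_ofc_only" "" != "") := by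
  rw [PySem.Dict.getD_eq_get?_getD]
  cases d.get? "promote_ofc_only" <;> simp

theorem generate_keyword_implied_vulnerability_py_spec : Claim_equal_generate_keyword_implied_vulnerability_py := by
  intro ofcs heuristics _
  unfold Spec_generate_keyword_implied_vulnerability_py
  unfold generate_keyword_implied_vulnerability_py generate_keyword_implied_vulnerability_py_alt
  have hfb : (let pp := PySem.Dict.getD (PySem.Dict.mk heuristics) "postprocess" []
      let promote : Bool := match PySem.Dict.get? (PySem.Dict.mk pp) "promote_ofc_only" with
        | some v => v != ""
        | none => false
      if promote then
        PySem.Dict.getD (PySem.Dict.mk pp) "generate_implied_vulnerability" "(Implied design weakness or gap in planning guidance)"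
      else
        "(Implied design weakness or missing standard)") = pvFallback heuristics := by
    simp only [pvFallback, pvPromote_eq]
  simp only [pvFoldl_eq, List.nil_append]
  rw [hfb]
  have hgs : ((PySem.List.slice ofcs none (some 2)).flatMap
        (fun s => (pvMinGroup? (PySem.Str.lower s)).toList))
      = ((PySem.List.slice ofcs none (some 2)).map PySem.Str.lower).flatMap
        (fun x => (pvMinGroup? x).toList) := by
    rw [List.flatMap_map]
  rw [hgs]
  have H := pvMin?_enum 0 ((PySem.List.slice ofcs none (some 2)).map PySem.Str.lower)
  cases hm : pvMin? ((PySem.List.enumerate ((PySem.List.slice ofcs none (some 2)).map PySem.Str.lower) 0).flatMap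
      (fun p => pvHitsFor p.1 p.2)) with
  | none =>
    rw [hm] at H
    simp only [Option.map_none] at H
    replace H := H.symm
    rw [List.head?_eq_none_iff] at H
    rw [H]
    simp
  | some m =>
    rw [hm] at H
    simp only [Option.map_some] at H
    cases hgl : (((PySem.List.slice ofcs none (some 2)).map PySem.Str.lower).flatMap
        (fun x => (pvMinGroup? x).toList)) with
    | nil => rw [hgl] at H; simp at H
    | cons g gs =>
      rw [hgl] at H
      simp only [List.head?_cons, Option.some.injEq] at H
      simp [H, pvLabelOf]
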